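-- pv_equiv track=rewrite | github.com/JulianHooghordel/DSS_thesis_project_2024_sem2 | chunking_module.py | chunk_summary_assignment_dict
-- ===== SOURCE A (Python) =====
-- def chunk_summary_assignment_dict(summary_sentences, most_similar_chunk_indices):
--     # Create a dictionary to store sentences associated with each chunk
--     chunk_sentences_dict = {}
--
--     # Populate the dictionary with sentences associated with each chunk
--     for j, summary_sentence in enumerate(summary_sentences):
--         most_similar_chunk_index = most_similar_chunk_indices[j]
--         if most_similar_chunk_index not in chunk_sentences_dict:
--             chunk_sentences_dict[most_similar_chunk_index] = []
--         chunk_sentences_dict[most_similar_chunk_index].append(summary_sentence)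
--
--     # Create a list to store chunk-summary pairs
--     chunk_summary_pairs = {}
--
--     # Concatenate sentences associated with each chunk
--     for chunk_index, sentences in chunk_sentences_dict.items():
--         summary_sentence = " ".join(sentences)  # Concatenate sentences associated with the chunk
--         chunk_summary_pairs[chunk_index] = summary_sentence
--
--     return chunk_summary_pairs
-- ===== SOURCE B (Python) =====
-- def chunk_summary_assignment_dict(summary_sentences, most_similar_chunk_indices):
--     # Single pass: maintain the joined summary string per chunk index directly.
--     result = {}
--     for sentence, chunk_index in zip(summary_sentences, most_similar_chunk_indices):
--         if chunk_index in result: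
--             result[chunk_index] = result[chunk_index] + " " + sentence
--         else:
--             result[chunk_index] = sentence
--     return result
-- ===== Notes on version B (the rewrite author's own statement) =====
-- stated objective: simpler
-- what changed: B replaces A's two phases (index-driven grouping into a dict of lists, then a second loop joining each list) by a single pass over zip(sentences, indices) that maintains the joined string per chunk index directly.
import Mathlib
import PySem

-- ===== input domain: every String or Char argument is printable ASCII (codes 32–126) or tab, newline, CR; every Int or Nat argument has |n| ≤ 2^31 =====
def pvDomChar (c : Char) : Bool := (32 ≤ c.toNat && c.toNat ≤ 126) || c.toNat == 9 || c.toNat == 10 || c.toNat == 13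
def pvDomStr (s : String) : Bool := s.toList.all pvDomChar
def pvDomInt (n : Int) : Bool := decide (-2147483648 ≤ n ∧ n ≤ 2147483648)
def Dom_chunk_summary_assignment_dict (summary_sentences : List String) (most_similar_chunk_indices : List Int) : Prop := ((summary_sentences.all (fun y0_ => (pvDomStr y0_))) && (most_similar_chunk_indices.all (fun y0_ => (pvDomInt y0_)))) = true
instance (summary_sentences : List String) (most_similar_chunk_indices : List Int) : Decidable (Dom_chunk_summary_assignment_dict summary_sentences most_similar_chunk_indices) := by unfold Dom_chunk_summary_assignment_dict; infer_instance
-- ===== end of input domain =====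

-- B builds the joined summary string per chunk in a single pass over zip(sentences, indices),
-- dropping A's intermediate dict-of-lists and second join loop (objective: simpler).

-- ===== PORT A =====
-- literal port: first loop groups sentences into lists per chunk index (indexing
-- most_similar_chunk_indices[j], an IndexError when too short — excluded by Pre_),
-- second loop joins each list with " ".
def chunk_summary_assignment_dict (summary_sentences : List String) (most_similar_chunk_indices : List Int) : List (Int × String) :=
  let chunk_sentences_dict : PySem.Dict Int (List String) :=
    (PySem.List.enumerate summary_sentences).foldl
      (fun d p =>
        let c := PySem.List.pyGetD most_similar_chunk_indices p.1 0
        let d' := if d.contains c then d else d.insert c ([] : List String)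
        d'.insert c (d'.getD c [] ++ [p.2]))
      PySem.Dict.empty
  let chunk_summary_pairs : PySem.Dict Int String :=
    chunk_sentences_dict.items.foldl
      (fun d2 q => d2.insert q.1 (PySem.Str.join " " q.2)) PySem.Dict.empty
  chunk_summary_pairs.items

-- ===== PORT B =====
def chunk_summary_assignment_dict_alt (summary_sentences : List String) (most_similar_chunk_indices : List Int) : List (Int × String) :=
  ((summary_sentences.zip most_similar_chunk_indices).foldl
    (fun d p =>
      match d.get? p.2 with
      | some prev => d.insert p.2 (prev ++ " " ++ p.1)
      | none => d.insert p.2 p.1)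
    PySem.Dict.empty).items

-- ===== PRECONDITION & SPEC =====
-- Pre_ excludes exactly the inputs where A raises IndexError: fewer chunk indices than sentences.
def Pre_chunk_summary_assignment_dict (summary_sentences : List String) (most_similar_chunk_indices : List Int) : Prop :=
  summary_sentences.length ≤ most_similar_chunk_indices.length
instance (summary_sentences : List String) (most_similar_chunk_indices : List Int) : Decidable (Pre_chunk_summary_assignment_dict summary_sentences most_similar_chunk_indices) := by unfold Pre_chunk_summary_assignment_dict; infer_instance

def pvWitness_chunk_summary_assignment_dict : List String × List Int := (["hello there", "big world", "bye"], [1, 0, 1])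

def Spec_chunk_summary_assignment_dict (summary_sentences : List String) (most_similar_chunk_indices : List Int) (out : List (Int × String)) : Prop := out = chunk_summary_assignment_dict_alt summary_sentences most_similar_chunk_indices
instance (summary_sentences : List String) (most_similar_chunk_indices : List Int) (out : List (Int × String)) : Decidable (Spec_chunk_summary_assignment_dict summary_sentences most_similar_chunk_indices out) := by unfold Spec_chunk_summary_assignment_dict; infer_instance

-- ===== CLAIM (what is proved, stated in full; the proofs are below) =====
def Claim_equal_chunk_summary_assignment_dict : Prop := ∀ (summary_sentences : List String) (most_similar_chunk_indices : List Int), Dom_chunk_summary_assignment_dict summary_sentences most_similar_chunk_indices → Pre_chunk_summary_assignment_dict summary_sentences most_similar_chunk_indices → Spec_chunk_summary_assignment_dict summary_sentences most_similar_chunk_indices (chunk_summary_assignment_dict summary_sentences most_similar_chunk_indices)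

-- ===== LEMMAS AND PROOFS =====

-- the per-pair join of A's second loop
def jpair (p : Int × List String) : Int × String := (p.1, PySem.Str.join " " p.2)

-- A's first-loop body, reformulated on the (sentence, chunk-index) pair (the chunk index
-- already looked up); the loop body of port A over `enumerate` is proved equal to a fold
-- of this function over the zip (lemma foldA_enum_zip).
def stepAc (d : PySem.Dict Int (List String)) (p : String × Int) : PySem.Dict Int (List String) :=
  let c := p.2
  let d' := if d.contains c then d else d.insert c ([] : List String)
  d'.insert c (d'.getD c [] ++ [p.1])

-- B's loop body
def stepB (d : PySem.Dict Int String) (p : String × Int) : PySem.Dict Int String :=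
  match d.get? p.2 with
  | some prev => d.insert p.2 (prev ++ " " ++ p.1)
  | none => d.insert p.2 p.1

lemma contains_mk_any {α : Type} (items : List (Int × α)) (k : Int) :
    (PySem.Dict.mk items).contains k = items.any (fun p => p.1 == k) := rfl

lemma items_insert {α : Type} (items : List (Int × α)) (k : Int) (v : α) :
    ((PySem.Dict.mk items).insert k v).items =
      if items.any (fun p => p.1 == k) then items.map (fun p => if p.1 == k then (k, v) else p)
      else items ++ [(k, v)] := by
  simp only [PySem.Dict.insert, contains_mk_any]
  split <;> rfl

lemma get?_of_any_false {α : Type} (items : List (Int × α)) (c : Int)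
    (h : items.any (fun p => p.1 == c) = false) : (PySem.Dict.mk items).get? c = none := by
  induction items with
  | nil => rfl
  | cons q rest ih =>
    simp only [List.any_cons, Bool.or_eq_false_iff] at h
    rw [PySem.Dict.get?_mk_cons, h.1]
    exact ih h.2

lemma get?_of_any_true {α : Type} (items : List (Int × α)) (c : Int)
    (h : items.any (fun p => p.1 == c) = true) :
    ∃ v, (PySem.Dict.mk items).get? c = some v ∧ (c, v) ∈ items := by
  induction items with
  | nil => simp at h
  | cons q rest ih =>
    rw [PySem.Dict.get?_mk_cons]
    by_cases hq : q.1 == c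
    · refine ⟨q.2, by simp [hq], ?_⟩
      have : q.1 = c := by simpa using hq
      simp [← this]
    · simp only [List.any_cons, hq, Bool.false_or] at h
      obtain ⟨v, hv, hmem⟩ := ih h
      exact ⟨v, by simp [hq, hv], by simp [hmem]⟩

lemma get?_mk_map_jpair (items : List (Int × List String)) (c : Int) :
    (PySem.Dict.mk (items.map jpair)).get? c
      = ((PySem.Dict.mk items).get? c).map (fun ls => PySem.Str.join " " ls) := by
  induction items with
  | nil => rfl
  | cons q rest ih =>
    simp only [List.map_cons, jpair]
    rw [PySem.Dict.get?_mk_cons, PySem.Dict.get?_mk_cons]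
    by_cases hq : q.1 == c <;> simp [hq, ih]

lemma chars_join_append_singleton (sep : List Char) (ls : List (List Char)) (a x : List Char) :
    PySem.Chars.join sep ((a :: ls) ++ [x]) = PySem.Chars.join sep (a :: ls) ++ sep ++ x := by
  induction ls generalizing a with
  | nil => rw [List.cons_append, List.nil_append, PySem.Chars.join_cons_cons,
      PySem.Chars.join_singleton, PySem.Chars.join_singleton]
  | cons b t ih =>
    simp only [List.cons_append, PySem.Chars.join_cons_cons]
    have hb := ih b
    simp only [List.cons_append] at hb
    rw [hb]
    simp [List.append_assoc]

lemma join_singleton_str (s : String) : PySem.Str.join " " [s] = s := by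
  apply String.toList_inj.mp
  simp [PySem.Str.toList_join, PySem.Chars.join_singleton]

lemma join_append_singleton (ls : List String) (s : String) (h : ls ≠ []) :
    PySem.Str.join " " (ls ++ [s]) = PySem.Str.join " " ls ++ " " ++ s := by
  obtain ⟨a, t, rfl⟩ : ∃ a t, ls = a :: t := by
    cases ls with
    | nil => exact absurd rfl h
    | cons a t => exact ⟨a, t, rfl⟩
  apply String.toList_inj.mp
  simp only [String.toList_append, PySem.Str.toList_join, List.map_append, List.map_cons]
  have := chars_join_append_singleton " ".toList (t.map String.toList) a.toList s.toList
  simpa using this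

-- one step preserves "B's dict is A's dict with every list joined" and nonemptiness of A's lists
lemma step_inv (itemsA : List (Int × List String)) (hne : ∀ p ∈ itemsA, p.2 ≠ []) (s : String) (c : Int) :
    (stepB (PySem.Dict.mk (itemsA.map jpair)) (s, c)).items
        = (stepAc (PySem.Dict.mk itemsA) (s, c)).items.map jpair ∧
      ∀ p ∈ (stepAc (PySem.Dict.mk itemsA) (s, c)).items, p.2 ≠ [] := by
  by_cases hc : itemsA.any (fun p => p.1 == c) = true
  · -- key already present
    obtain ⟨ls, hget, hmem⟩ := get?_of_any_true itemsA c hc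
    have hlsne : ls ≠ [] := hne _ hmem
    have hAitems : (stepAc (PySem.Dict.mk itemsA) (s, c)).items
        = itemsA.map (fun p => if p.1 == c then (c, ls ++ [s]) else p) := by
      simp only [stepAc, contains_mk_any, if_true, PySem.Dict.getD, hget, Option.getD_some,
        items_insert, hc]
    have hBget : (PySem.Dict.mk (itemsA.map jpair)).get? c = some (PySem.Str.join " " ls) := by
      rw [get?_mk_map_jpair, hget]; rfl
    have hcB : (itemsA.map jpair).any (fun p => p.1 == c) = true := by
      simpa [List.any_map, Function.comp, jpair] using hc
    have hBitems : (stepB (PySem.Dict.mk (itemsA.map jpair)) (s, c)).items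
        = (itemsA.map jpair).map (fun q => if q.1 == c then (c, PySem.Str.join " " ls ++ " " ++ s) else q) := by
      simp only [stepB, hBget, items_insert, hcB, if_true]
    constructor
    · rw [hAitems, hBitems, List.map_map, List.map_map]
      apply List.map_congr_left
      intro p _
      by_cases hp : p.1 = c
      · simp [Function.comp, hp, jpair, join_append_singleton ls s hlsne]
      · simp [Function.comp, hp, jpair]
    · rw [hAitems]
      intro p hp
      obtain ⟨q, hq, rfl⟩ := List.mem_map.mp hp
      by_cases hqc : q.1 = c <;> simp [hqc, hne q hq]
  · -- new key
    have hc' : itemsA.any (fun p => p.1 == c) = false := Bool.eq_false_iff.mpr hc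
    have hAkeys : ∀ p ∈ itemsA, p.1 ≠ c := by
      intro p hp h
      have : itemsA.any (fun p => p.1 == c) = true := List.any_eq_true.mpr ⟨p, hp, by simp [h]⟩
      rw [hc'] at this
      exact Bool.noConfusion this
    have hd' : ((PySem.Dict.mk itemsA).insert c ([] : List String)).items = itemsA ++ [(c, [])] := by
      rw [items_insert, if_neg (by simp [hc'])]
    have hanynew : (itemsA ++ [(c, ([] : List String))]).any (fun p => p.1 == c) = true := by
      simp
    have hgetnew : (PySem.Dict.mk (itemsA ++ [(c, ([] : List String))])).get? c = some [] := by
      obtain ⟨v, hv, hmem⟩ := get?_of_any_true (itemsA ++ [(c, ([] : List String))]) c hanynew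
      have : v = [] := by
        rcases List.mem_append.mp hmem with h1 | h2
        · exact absurd rfl (hAkeys _ h1)
        · simpa using h2
      rw [hv, this]
    have hAitems : (stepAc (PySem.Dict.mk itemsA) (s, c)).items = itemsA ++ [(c, [s])] := by
      have hcont : (PySem.Dict.mk itemsA).contains c = false := by
        rw [contains_mk_any]; exact hc'
      simp only [stepAc, hcont, Bool.false_eq_true, if_false]
      -- d' = insert c []
      have hmk : (PySem.Dict.mk itemsA).insert c ([] : List String)
          = PySem.Dict.mk (itemsA ++ [(c, [])]) := by
        apply PySem.Dict.ext; exact hd'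
      rw [hmk]
      simp only [PySem.Dict.getD, hgetnew, Option.getD_some, List.nil_append]
      rw [items_insert, if_pos hanynew]
      rw [List.map_append]
      congr 1
      · apply (List.map_congr_left (fun p hp => by simp [hAkeys p hp])).trans (List.map_id _)
      · simp
    have hBget : (PySem.Dict.mk (itemsA.map jpair)).get? c = none := by
      rw [get?_mk_map_jpair, get?_of_any_false itemsA c hc']; rfl
    have hcB : (itemsA.map jpair).any (fun p => p.1 == c) = false := by
      simpa [List.any_map, Function.comp, jpair] using hc'
    have hBitems : (stepB (PySem.Dict.mk (itemsA.map jpair)) (s, c)).items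
        = itemsA.map jpair ++ [(c, s)] := by
      simp only [stepB, hBget, items_insert, hcB]
      simp
    constructor
    · rw [hAitems, hBitems, List.map_append]
      simp [jpair, join_singleton_str]
    · rw [hAitems]
      intro p hp
      rcases List.mem_append.mp hp with h1 | h2
      · exact hne p h1
      · simp at h2; simp [h2]

-- the fold invariant over the whole pair list
lemma fold_inv (l : List (String × Int)) :
    ∀ (itemsA : List (Int × List String)), (∀ p ∈ itemsA, p.2 ≠ []) →
    (l.foldl stepB (PySem.Dict.mk (itemsA.map jpair))).items
        = (l.foldl stepAc (PySem.Dict.mk itemsA)).items.map jpair ∧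
      ∀ p ∈ (l.foldl stepAc (PySem.Dict.mk itemsA)).items, p.2 ≠ [] := by
  induction l with
  | nil => intro itemsA hne; exact ⟨rfl, hne⟩
  | cons q rest ih =>
    intro itemsA hne
    obtain ⟨hmap, hne'⟩ := step_inv itemsA hne q.1 q.2
    have hA' : stepAc (PySem.Dict.mk itemsA) q = PySem.Dict.mk ((stepAc (PySem.Dict.mk itemsA) (q.1, q.2)).items) := by
      apply PySem.Dict.ext; rfl
    have hB' : stepB (PySem.Dict.mk (itemsA.map jpair)) q
        = PySem.Dict.mk ((stepAc (PySem.Dict.mk itemsA) (q.1, q.2)).items.map jpair) := by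
      apply PySem.Dict.ext; rw [← hmap]
    simp only [List.foldl_cons]
    rw [hA', hB']
    exact ih _ hne'

-- keys of A's grouping dict stay Nodup
lemma keys_step (itemsA : List (Int × List String)) (hnd : (itemsA.map (·.1)).Nodup) (s : String) (c : Int) :
    ((stepAc (PySem.Dict.mk itemsA) (s, c)).items.map (·.1)).Nodup := by
  by_cases hc : itemsA.any (fun p => p.1 == c) = true
  · obtain ⟨ls, hget, _⟩ := get?_of_any_true itemsA c hc
    have hAitems : (stepAc (PySem.Dict.mk itemsA) (s, c)).items
        = itemsA.map (fun p => if p.1 == c then (c, ls ++ [s]) else p) := by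
      simp only [stepAc, contains_mk_any, if_true, PySem.Dict.getD, hget, Option.getD_some,
        items_insert, hc]
    rw [hAitems, List.map_map]
    have : ((fun (p : Int × List String) => p.1) ∘ (fun p => if p.1 == c then (c, ls ++ [s]) else p))
        = (fun p => p.1) := by
      funext p; by_cases hp : p.1 = c <;> simp [hp]
    rw [this]; exact hnd
  · have hc' : itemsA.any (fun p => p.1 == c) = false := Bool.eq_false_iff.mpr hc
    have hAkeys : ∀ p ∈ itemsA, p.1 ≠ c := by
      intro p hp h
      have : itemsA.any (fun p => p.1 == c) = true := List.any_eq_true.mpr ⟨p, hp, by simp [h]⟩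
      rw [hc'] at this
      exact Bool.noConfusion this
    have hgetnew : (PySem.Dict.mk (itemsA ++ [(c, ([] : List String))])).get? c = some [] := by
      obtain ⟨v, hv, hmem⟩ := get?_of_any_true (itemsA ++ [(c, ([] : List String))]) c (by simp)
      have : v = [] := by
        rcases List.mem_append.mp hmem with h1 | h2
        · exact absurd rfl (hAkeys _ h1)
        · simpa using h2
      rw [hv, this]
    have hAitems : (stepAc (PySem.Dict.mk itemsA) (s, c)).items = itemsA ++ [(c, [s])] := by
      have hcont : (PySem.Dict.mk itemsA).contains c = false := by
        rw [contains_mk_any]; exact hc'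
      simp only [stepAc, hcont, Bool.false_eq_true, if_false]
      have hmk : (PySem.Dict.mk itemsA).insert c ([] : List String)
          = PySem.Dict.mk (itemsA ++ [(c, [])]) := by
        apply PySem.Dict.ext
        rw [items_insert, if_neg (by simp [hc'])]
      rw [hmk]
      simp only [PySem.Dict.getD, hgetnew, Option.getD_some, List.nil_append]
      rw [items_insert, if_pos (by simp)]
      rw [List.map_append]
      congr 1
      · apply (List.map_congr_left (fun p hp => by simp [hAkeys p hp])).trans (List.map_id _)
      · simp
    rw [hAitems, List.map_append]
    simp only [List.map_cons, List.map_nil]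
    rw [List.nodup_append]
    refine ⟨hnd, List.nodup_singleton c, ?_⟩
    intro k hk
    obtain ⟨p, hp, rfl⟩ := List.mem_map.mp hk
    simpa using fun h => hAkeys p hp h

lemma keys_fold (l : List (String × Int)) :
    ∀ (itemsA : List (Int × List String)), (itemsA.map (·.1)).Nodup →
    ((l.foldl stepAc (PySem.Dict.mk itemsA)).items.map (·.1)).Nodup := by
  induction l with
  | nil => intro itemsA hnd; exact hnd
  | cons q rest ih =>
    intro itemsA hnd
    have h := keys_step itemsA hnd q.1 q.2
    have hA' : stepAc (PySem.Dict.mk itemsA) q = PySem.Dict.mk ((stepAc (PySem.Dict.mk itemsA) (q.1, q.2)).items) := by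
      apply PySem.Dict.ext; rfl
    simp only [List.foldl_cons]
    rw [hA']
    exact ih _ h

-- A's second loop, on accumulator with fresh keys, just maps jpair over the items
lemma second_loop (pairs : List (Int × List String)) :
    ∀ (acc : PySem.Dict Int String), (pairs.map (·.1)).Nodup →
    (∀ q ∈ pairs, acc.items.any (fun p => p.1 == q.1) = false) →
    (pairs.foldl (fun d2 q => d2.insert q.1 (PySem.Str.join " " q.2)) acc).items
      = acc.items ++ pairs.map jpair := by
  induction pairs with
  | nil => intro acc _ _; simp
  | cons q rest ih =>
    intro acc hnd hfresh
    have hq : acc.items.any (fun p => p.1 == q.1) = false := hfresh q (by simp)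
    have hacc : acc = PySem.Dict.mk acc.items := by apply PySem.Dict.ext; rfl
    have hins : (acc.insert q.1 (PySem.Str.join " " q.2)).items
        = acc.items ++ [(q.1, PySem.Str.join " " q.2)] := by
      rw [hacc, items_insert, if_neg (by simp [hq])]
    simp only [List.foldl_cons]
    have hnd' : (rest.map (·.1)).Nodup := (List.nodup_cons.mp (by simpa using hnd)).2
    have hq1 : q.1 ∉ rest.map (·.1) := (List.nodup_cons.mp (by simpa using hnd)).1
    rw [ih _ hnd' ?fresh, hins]
    · simp [jpair]
    case fresh =>
      intro r hr
      rw [hins]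
      simp only [List.any_append, Bool.or_eq_false_iff]
      refine ⟨hfresh r (by simp [hr]), ?_⟩
      simp only [List.any_cons, List.any_nil, Bool.or_false]
      have : r.1 ≠ q.1 := by
        intro h
        exact hq1 (h ▸ List.mem_map.mpr ⟨r, hr, rfl⟩)
      simpa using fun h => this (by simp [h])

-- A's enumerate/index loop is the zip fold of stepAc (given enough indices)
lemma foldA_enum_zip (ss : List String) :
    ∀ (idx pre : List Int) (a : PySem.Dict Int (List String)), ss.length ≤ idx.length →
    (PySem.List.enumerate ss ((pre.length : Nat) : Int)).foldl
        (fun d p =>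
          let c := PySem.List.pyGetD (pre ++ idx) p.1 0
          let d' := if d.contains c then d else d.insert c ([] : List String)
          d'.insert c (d'.getD c [] ++ [p.2])) a
      = (ss.zip idx).foldl stepAc a := by
  induction ss with
  | nil => intro idx pre a _; rw [PySem.List.enumerate_nil]; simp
  | cons x ss ih =>
    intro idx pre a hlen
    cases idx with
    | nil => simp at hlen
    | cons c idx' =>
      rw [PySem.List.enumerate_cons]
      simp only [List.zip_cons_cons, List.foldl_cons]
      have hget : PySem.List.pyGetD (pre ++ c :: idx') ((pre.length : Nat) : Int) 0 = c := by
        rw [PySem.List.pyGetD_natCast]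
        simp [List.getD]
      rw [hget]
      have hcast : ((pre.length : Nat) : Int) + 1 = (((pre ++ [c]).length : Nat) : Int) := by
        simp
      have happ : pre ++ c :: idx' = (pre ++ [c]) ++ idx' := by simp
      rw [hcast, happ]
      exact ih idx' (pre ++ [c]) _ (by simpa using hlen)

-- ===== VERDICT (by name: the statement is the Claim_ definition above) =====
theorem chunk_summary_assignment_dict_spec : Claim_equal_chunk_summary_assignment_dict := by
  intro ss idx _ hpre
  unfold Spec_chunk_summary_assignment_dict
  unfold Pre_chunk_summary_assignment_dict at hpre
  have h := foldA_enum_zip ss idx [] PySem.Dict.empty hpre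
  simp only [List.length_nil, Nat.cast_zero, List.nil_append] at h
  have hA1 : chunk_summary_assignment_dict ss idx
      = ((List.foldl stepAc PySem.Dict.empty (ss.zip idx)).items.foldl
          (fun d2 q => d2.insert q.1 (PySem.Str.join " " q.2)) PySem.Dict.empty).items := by
    unfold chunk_summary_assignment_dict
    rw [← h]
  obtain ⟨hmap, hne⟩ := fold_inv (ss.zip idx) [] (by simp)
  have hmap' : (List.foldl stepB PySem.Dict.empty (ss.zip idx)).items
      = List.map jpair (List.foldl stepAc PySem.Dict.empty (ss.zip idx)).items := hmap
  have hnd' : ((List.foldl stepAc PySem.Dict.empty (ss.zip idx)).items.map (fun x => x.1)).Nodup :=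
    keys_fold (ss.zip idx) [] (by simp)
  have hfresh : ∀ q ∈ (List.foldl stepAc PySem.Dict.empty (ss.zip idx)).items,
      (PySem.Dict.empty : PySem.Dict Int String).items.any (fun p => p.1 == q.1) = false :=
    fun q _ => rfl
  have h2 := second_loop ((List.foldl stepAc PySem.Dict.empty (ss.zip idx)).items)
    PySem.Dict.empty hnd' hfresh
  show chunk_summary_assignment_dict ss idx = (List.foldl stepB PySem.Dict.empty (ss.zip idx)).items
  rw [hA1, h2, hmap']
  rfl
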